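-- pv_equiv track=rewrite | github.com/AzyzHm/CodeForces-Problems- | python/Prime XOR Coloring.py | solve
-- ===== SOURCE A (Python) =====
-- def solve(n):
--     solution = []
--     i = 1
--     while len(solution) < n:
--         if i == 1:
--             solution.append(1)
--             i+=1
--         else:
--             solution.append(i)
--             solution.append(i)
--             if len(solution) > n:
--                 solution.pop()
--                 break
--             i+=1
--     x = " ".join(map(str,solution))
--     return "\n".join([str(solution[-1]), x])
-- ===== SOURCE B (Python) =====
-- def solve(n):
--     solution = [k // 2 + 1 for k in range(1, n + 1)]
--     x = " ".join(map(str, solution))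
--     return "\n".join([str(solution[-1]), x])
-- ===== Notes on version B (the rewrite author's own statement) =====
-- stated objective: simpler
-- what changed: Replaces A's while-loop accumulator with paired appends, a pop and a break by the closed-form index formula color[k] = k//2 + 1 mapped over range(1, n+1); the two output lines are formatted identically.
import Mathlib
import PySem

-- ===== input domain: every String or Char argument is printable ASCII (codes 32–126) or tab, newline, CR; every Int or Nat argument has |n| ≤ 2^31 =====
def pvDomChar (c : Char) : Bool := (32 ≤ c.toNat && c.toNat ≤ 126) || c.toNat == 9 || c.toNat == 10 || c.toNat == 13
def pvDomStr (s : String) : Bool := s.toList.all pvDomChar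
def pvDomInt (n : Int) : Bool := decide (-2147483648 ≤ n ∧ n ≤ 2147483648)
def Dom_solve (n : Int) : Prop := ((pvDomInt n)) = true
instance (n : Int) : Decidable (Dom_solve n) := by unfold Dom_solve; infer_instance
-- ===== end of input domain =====

-- B replaces A's while-loop accumulator (paired appends, pop, break) by the closed form
-- color[k] = k//2 + 1 mapped over range(1, n+1); output formatting is unchanged (objective: simpler).

-- ===== PORT A =====
-- the while loop: state (solution, i); terminates because solution grows each iteration
def solveLoop (n : Int) (solution : List Int) (i : Int) : List Int :=
  if _h : (solution.length : Int) < n then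
    if i = 1 then
      solveLoop n (solution ++ [1]) (i + 1)
    else
      let s2 := solution ++ [i, i]
      if (s2.length : Int) > n then
        s2.dropLast              -- solution.pop(); break
      else
        solveLoop n s2 (i + 1)
  else solution
termination_by (n - solution.length).toNat
decreasing_by
  all_goals simp only [List.length_append, List.length_cons, List.length_nil]
  all_goals omega

def solve (n : Int) : String :=
  let solution := solveLoop n [] 1
  let x := PySem.Str.join " " (solution.map PySem.Int.toStr)
  -- solution[-1]: A raises IndexError on empty solution (n ≤ 0); Pre_solve excludes that,
  -- so the default of getD is never reached
  PySem.Str.join "\n" [PySem.Int.toStr ((PySem.List.pyGet? solution (-1)).getD 0), x]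

-- ===== PORT B =====
def solve_alt (n : Int) : String :=
  let solution := (PySem.List.pyRange 1 (n + 1) 1).map (fun k => PySem.Int.floordiv k 2 + 1)
  let x := PySem.Str.join " " (solution.map PySem.Int.toStr)
  PySem.Str.join "\n" [PySem.Int.toStr ((PySem.List.pyGet? solution (-1)).getD 0), x]

-- ===== PRECONDITION & SPEC =====
-- Pre_ excludes n ≤ 0, on which A (solution[-1] of the empty list) raises IndexError.
def Pre_solve (n : Int) : Prop := 1 ≤ n
instance (n : Int) : Decidable (Pre_solve n) := by unfold Pre_solve; infer_instance
def pvWitness_solve : Int := (5)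

def Spec_solve (n : Int) (out : String) : Prop := out = solve_alt n
instance (n : Int) (out : String) : Decidable (Spec_solve n out) := by unfold Spec_solve; infer_instance

-- ===== CLAIM (what is proved, stated in full; the proofs are below) =====
def Claim_equal_solve : Prop := ∀ (n : Int), Dom_solve n → Pre_solve n → Spec_solve n (solve n)

-- ===== LEMMAS AND PROOFS =====

lemma take_concat' {a : Type} (l : List a) (m : Nat) (h : m < l.length) :
    l.take m ++ [l[m]] = l.take (m + 1) := by
  rw [← List.concat_eq_append]; exact List.take_concat_get h

-- B's list
def tgt (n : Int) : List Int :=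
  (PySem.List.pyRange 1 (n + 1) 1).map (fun k => PySem.Int.floordiv k 2 + 1)

lemma tgt_length (n : Int) : (tgt n).length = n.toNat := by
  simp [tgt, PySem.List.length_pyRange_one]
  try omega

lemma tgt_getElem (n : Int) (j : Nat) (hj : j < (tgt n).length) :
    (tgt n)[j] = PySem.Int.floordiv (1 + j) 2 + 1 := by
  simp [tgt, PySem.List.getElem_pyRange_one]

lemma loop_inv (n : Int) (hn : 1 ≤ n) :
    ∀ (fuel : Nat) (i : Int), 2 ≤ i → 2 * i - 3 ≤ n → (n - (2 * i - 3)).toNat ≤ fuel →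
      solveLoop n ((tgt n).take (2 * i - 3).toNat) i = tgt n := by
  intro fuel
  induction fuel with
  | zero =>
      intro i hi hle hfuel
      have heq : 2 * i - 3 = n := by omega
      rw [solveLoop]
      have hlen : ((tgt n).take (2 * i - 3).toNat).length = n.toNat := by
        simp [List.length_take, tgt_length]; omega
      rw [dif_neg (by rw [hlen]; omega)]
      apply List.take_of_length_le
      rw [tgt_length]; omega
  | succ fuel ih =>
      intro i hi hle hfuel
      by_cases heq : 2 * i - 3 = n
      · rw [solveLoop]
        have hlen : ((tgt n).take (2 * i - 3).toNat).length = n.toNat := by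
          simp [List.length_take, tgt_length]; omega
        rw [dif_neg (by rw [hlen]; omega)]
        apply List.take_of_length_le
        rw [tgt_length]; omega
      · have hlt : 2 * i - 3 < n := lt_of_le_of_ne hle heq
        have hlen : ((tgt n).take (2 * i - 3).toNat).length = (2 * i - 3).toNat := by
          simp [List.length_take, tgt_length]; omega
        rw [solveLoop]
        rw [dif_pos (by rw [hlen]; omega)]
        rw [if_neg (by omega)]
        have hm0 : (2 * i - 3).toNat < (tgt n).length := by rw [tgt_length]; omega
        have hv0 : (tgt n)[(2 * i - 3).toNat] = i := by
          rw [tgt_getElem]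
          have : (1 + ((2 * i - 3).toNat : Int)) = 2 * i - 2 := by omega
          rw [this, PySem.Int.floordiv_eq_ediv_of_pos (by omega)]
          omega
        have hstep1 := take_concat' (tgt n) (2 * i - 3).toNat hm0
        rw [hv0] at hstep1
        by_cases hbig : n < 2 * i - 1
        · -- n = 2*i - 2 : append pair, pop, break
          have hn2 : n = 2 * i - 2 := by omega
          rw [if_pos (by simp [List.length_append, hlen]; omega)]
          have : (tgt n).take (2 * i - 3).toNat ++ [i, i] =
              ((tgt n).take (2 * i - 3).toNat ++ [i]) ++ [i] := by simp
          rw [this, List.dropLast_concat, hstep1]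
          apply List.take_of_length_le
          rw [tgt_length]; omega
        · -- pair fits: recurse
          rw [if_neg (by simp [List.length_append, hlen]; omega)]
          have hm1 : (2 * i - 3).toNat + 1 < (tgt n).length := by rw [tgt_length]; omega
          have hv1 : (tgt n)[(2 * i - 3).toNat + 1] = i := by
            rw [tgt_getElem]
            have : (1 + (((2 * i - 3).toNat + 1 : Nat) : Int)) = 2 * i - 1 := by push_cast; omega
            rw [this, PySem.Int.floordiv_eq_ediv_of_pos (by omega)]
            omega
          have hstep2' := take_concat' (tgt n) ((2 * i - 3).toNat + 1) hm1
          rw [hv1] at hstep2'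
          have hstep2 : (tgt n).take (2 * i - 3).toNat ++ [i, i] =
              (tgt n).take (2 * (i + 1) - 3).toNat := by
            have h1 : (tgt n).take (2 * i - 3).toNat ++ [i, i] =
                ((tgt n).take (2 * i - 3).toNat ++ [i]) ++ [i] := by simp
            rw [h1, hstep1, hstep2']
            congr 1
            omega
          rw [hstep2]
          exact ih (i + 1) (by omega) (by omega) (by omega)

lemma loop_eq_tgt (n : Int) (hn : 1 ≤ n) : solveLoop n [] 1 = tgt n := by
  rw [solveLoop]
  rw [dif_pos (by simp; omega)]
  rw [if_pos rfl]
  have h1 : ([] : List Int) ++ [1] = (tgt n).take ((2 * (2:Int) - 3)).toNat := by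
    have h0 : 0 < (tgt n).length := by rw [tgt_length]; omega
    have hv : (tgt n)[0] = 1 := by
      rw [tgt_getElem]
      norm_num [PySem.Int.floordiv_eq_ediv_of_pos]
    have ht : (tgt n).take 1 = [(tgt n)[0]] := by
      rw [← take_concat' _ _ h0]; simp
    simp only [List.nil_append]
    rw [show ((2 * (2:Int) - 3)).toNat = 1 by decide, ht, hv]
  rw [h1]
  exact loop_inv n hn (n - 1).toNat 2 (by omega) (by omega) (by omega)

-- ===== VERDICT (by name: the statement is the Claim_ definition above) =====
theorem solve_spec : Claim_equal_solve := by
  intro n _ hpre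
  unfold Spec_solve solve solve_alt
  rw [show ((PySem.List.pyRange 1 (n + 1) 1).map (fun k => PySem.Int.floordiv k 2 + 1)) = tgt n from rfl,
      loop_eq_tgt n hpre]
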